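-- pv_equiv track=rewrite | github.com/qcstyrogit-main/erp_ai_assistant | erp_ai_assistant/api/prompt_builder.py | _detect_user_tier
-- ===== SOURCE A (Python) =====
-- def _detect_user_tier(roles: list[str]) -> str:
--     """Detect user tier for adaptive communication."""
--     role_set = set(roles)
--     if "System Manager" in role_set:
--         return "system_manager"
--     manager_roles = {r for r in role_set if "Manager" in r}
--     if manager_roles:
--         return "manager"
--     return "operator"
-- ===== SOURCE B (Python) =====
-- _TIER_NAMES = ("operator", "manager", "system_manager")
--
--
-- def _role_rank(r: str) -> int:
--     if r == "System Manager":
--         return 2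
--     if "Manager" in r:
--         return 1
--     return 0
--
--
-- def _detect_user_tier(roles: list[str]) -> str:
--     """Detect user tier for adaptive communication."""
--     return _TIER_NAMES[max(map(_role_rank, roles), default=0)]
-- ===== Notes on version B (the rewrite author's own statement) =====
-- stated objective: alternative
-- what changed: Recasts the branch-and-set logic arithmetically: each role is scored 0/1/2 by a rank function, the maximum rank is reduced over the list, and the tier name is read from a table indexed by that maximum.
import Mathlib
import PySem

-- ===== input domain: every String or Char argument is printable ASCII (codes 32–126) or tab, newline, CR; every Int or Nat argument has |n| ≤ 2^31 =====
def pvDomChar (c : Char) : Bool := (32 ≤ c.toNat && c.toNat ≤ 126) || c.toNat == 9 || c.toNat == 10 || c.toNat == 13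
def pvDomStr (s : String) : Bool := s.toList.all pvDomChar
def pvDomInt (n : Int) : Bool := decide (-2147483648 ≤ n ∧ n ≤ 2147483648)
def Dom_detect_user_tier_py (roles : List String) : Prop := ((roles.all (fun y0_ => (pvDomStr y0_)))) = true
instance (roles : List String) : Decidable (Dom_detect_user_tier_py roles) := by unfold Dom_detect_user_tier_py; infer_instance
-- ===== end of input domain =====

-- B recasts A's set/branch logic as a max-reduction of 0/1/2 role ranks read off a name table (alternative decomposition, same cost).


-- ===== PORT A =====
-- Literal port of A: build the role set, test "System Manager" membership,
-- then filter for roles containing "Manager" and test non-emptiness.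
def detect_user_tier_py (roles : List String) : String :=
  let role_set : PySem.Set String := PySem.Set.ofList roles
  if PySem.Set.contains role_set "System Manager" then "system_manager"
  else
    let manager_roles : PySem.Set String := role_set.filter (fun r => PySem.Str.isIn "Manager" r)
    if manager_roles ≠ ([] : List String) then "manager" else "operator"

-- ===== PORT B =====
-- B: score each role 0/1/2, take the max (default 0), look the name up in a table.
def pvTierNames : List String := ["operator", "manager", "system_manager"]

def pvRoleRank (r : String) : Nat :=
  if r = "System Manager" then 2
  else if PySem.Str.isIn "Manager" r then 1
  else 0

def detect_user_tier_py_alt (roles : List String) : String :=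
  pvTierNames.getD ((roles.map pvRoleRank).foldl max 0) ""

-- ===== PRECONDITION & SPEC =====
def Spec_detect_user_tier_py (roles : List String) (out : String) : Prop := out = detect_user_tier_py_alt roles
instance (roles : List String) (out : String) : Decidable (Spec_detect_user_tier_py roles out) := by unfold Spec_detect_user_tier_py; infer_instance

-- ===== CLAIM (what is proved, stated in full; the proofs are below) =====
def Claim_equal_detect_user_tier_py : Prop := ∀ (roles : List String), Dom_detect_user_tier_py roles → Spec_detect_user_tier_py roles (detect_user_tier_py roles)

-- ===== LEMMAS AND PROOFS =====
lemma fold_max_rank (p : String → Bool) (s : String) (hp : p s = true)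
    (roles : List String) (b : Nat) :
    (roles.map (fun r => if r = s then 2 else if p r then 1 else 0)).foldl max b =
      max b (if s ∈ roles then 2 else if roles.any p then 1 else 0) := by
  induction roles generalizing b with
  | nil => simp
  | cons r rest ih =>
    simp only [List.map_cons, List.foldl_cons, List.mem_cons, List.any_cons, ih]
    by_cases hpr : p r = true <;> by_cases hany : rest.any p = true <;>
      by_cases h : r = s <;> by_cases hm : s ∈ rest <;>
        simp_all <;> split_ifs <;> simp_all

lemma fold_rank_char (roles : List String) (b : Nat) :
    (roles.map pvRoleRank).foldl max b =
      max b (if "System Manager" ∈ roles then 2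
             else if roles.any (fun r => PySem.Str.isIn "Manager" r) then 1 else 0) := by
  have h := fold_max_rank (fun r => PySem.Str.isIn "Manager" r) "System Manager"
    (by decide) roles b
  simpa [pvRoleRank] using h

lemma filter_ofList_ne_nil (roles : List String) (f : String → Bool) :
    ((PySem.Set.ofList roles).filter f ≠ ([] : List String)) ↔ roles.any f = true := by
  rw [ne_eq, List.filter_eq_nil_iff]
  simp only [not_forall, List.any_eq_true]
  constructor
  · rintro ⟨x, hx, hf⟩
    exact ⟨x, (PySem.Set.mem_ofList _ _).1 hx, by simpa using hf⟩
  · rintro ⟨x, hx, hf⟩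
    exact ⟨x, (PySem.Set.mem_ofList _ _).2 hx, by simpa using hf⟩

-- ===== VERDICT (by name: the statement is the Claim_ definition above) =====
theorem detect_user_tier_py_spec : Claim_equal_detect_user_tier_py := by
  intro roles _
  unfold Spec_detect_user_tier_py detect_user_tier_py detect_user_tier_py_alt
  rw [fold_rank_char]
  simp only [Nat.zero_max]
  by_cases h : "System Manager" ∈ roles
  · simp [PySem.Set.contains, h, pvTierNames]
  · simp only [PySem.Set.contains]
    rw [if_neg (by simpa using h), if_neg h]
    by_cases hany : roles.any (fun r => PySem.Str.isIn "Manager" r) = true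
    · rw [if_pos hany, if_pos ((filter_ofList_ne_nil _ _).2 hany)]; rfl
    · rw [if_neg hany, if_neg (fun hne => hany ((filter_ofList_ne_nil _ _).1 hne))]; rfl
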